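-- pv_equiv track=rewrite | github.com/RanaBKamal/movie-ticket-data-visualisation | Utils/MovieSeatHelper.py | bookSeatAt
-- ===== SOURCE A (Python) =====
-- def bookSeatAt(row, col, seat_status_array):
--     position_counter = 0
--     break_out_flag = False
--     for i in range(10):
--         for j in range(6):
--             if i == row and j == col:
--                 seat_status_array[position_counter] = True
--                 break_out_flag = True
--                 break
--             position_counter += 1
--
--         if break_out_flag:
--             break
--     return seat_status_array
-- ===== SOURCE B (Python) =====
-- def bookSeatAt(row, col, seat_status_array):
--     # Closed-form index instead of scanning the 10x6 grid (simpler).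
--     # NOTE: like A, mutates seat_status_array in place; equivalence is about the return value.
--     if 0 <= row < 10 and 0 <= col < 6:
--         seat_status_array[row * 6 + col] = True
--     return seat_status_array
-- ===== Notes on version B (the rewrite author's own statement) =====
-- stated objective: simpler
-- what changed: Replaces the 10x6 nested scan with a position counter and break flag by a single bounds check and the closed-form index row*6+col.
import Mathlib
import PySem

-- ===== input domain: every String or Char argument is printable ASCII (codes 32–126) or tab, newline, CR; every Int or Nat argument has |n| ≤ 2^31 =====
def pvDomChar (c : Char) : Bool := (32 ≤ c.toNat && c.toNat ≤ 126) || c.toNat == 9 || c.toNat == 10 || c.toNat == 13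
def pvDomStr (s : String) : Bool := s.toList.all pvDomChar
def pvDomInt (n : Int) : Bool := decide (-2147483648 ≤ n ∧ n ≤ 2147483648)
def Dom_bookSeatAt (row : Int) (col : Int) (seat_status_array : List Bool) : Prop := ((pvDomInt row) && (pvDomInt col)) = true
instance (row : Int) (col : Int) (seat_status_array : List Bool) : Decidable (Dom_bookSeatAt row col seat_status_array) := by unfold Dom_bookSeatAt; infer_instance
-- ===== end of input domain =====

-- B replaces A's 10x6 grid scan with the closed-form index row*6+col (simpler).
-- Like A, the Python B mutates seat_status_array in place; the equivalence proved is about the return value.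

-- ===== PORT A =====
-- inner 'for j in range(6)' loop: returns (array, position_counter, break_out_flag)
def bookSeatAtInner (row col i : Int) (js : List Int) (arr : List Bool) (pos : Int) :
    List Bool × Int × Bool :=
  match js with
  | [] => (arr, pos, false)
  | j :: rest =>
    if i = row ∧ j = col then (PySem.List.pySetD arr pos true, pos, true)
    else bookSeatAtInner row col i rest arr (pos + 1)

-- outer 'for i in range(10)' loop with the break_out_flag check
def bookSeatAtOuter (row col : Int) (is_ : List Int) (arr : List Bool) (pos : Int) : List Bool :=
  match is_ with
  | [] => arr
  | i :: rest =>
    let r := bookSeatAtInner row col i (PySem.List.pyRange 0 6 1) arr pos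
    if r.2.2 then r.1 else bookSeatAtOuter row col rest r.1 r.2.1

def bookSeatAt (row : Int) (col : Int) (seat_status_array : List Bool) : List Bool :=
  bookSeatAtOuter row col (PySem.List.pyRange 0 10 1) seat_status_array 0

-- ===== PORT B =====
def bookSeatAt_alt (row : Int) (col : Int) (seat_status_array : List Bool) : List Bool :=
  if 0 ≤ row ∧ row < 10 ∧ 0 ≤ col ∧ col < 6 then
    PySem.List.pySetD seat_status_array (row * 6 + col) true
  else seat_status_array

-- ===== PRECONDITION & SPEC =====
-- Pre_ excludes exactly the inputs where the Python A raises IndexError: in-grid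
-- coordinates whose flat index row*6+col is past the end of seat_status_array.
def Pre_bookSeatAt (row : Int) (col : Int) (seat_status_array : List Bool) : Prop :=
  (0 ≤ row ∧ row < 10 ∧ 0 ≤ col ∧ col < 6) → row * 6 + col < (seat_status_array.length : Int)
instance (row : Int) (col : Int) (seat_status_array : List Bool) : Decidable (Pre_bookSeatAt row col seat_status_array) := by unfold Pre_bookSeatAt; infer_instance

def pvWitness_bookSeatAt : Int × Int × List Bool :=
  (2, 3, [false, false, false, false, false, false, false, false, false, false,
          false, false, false, false, false, false])

def Spec_bookSeatAt (row : Int) (col : Int) (seat_status_array : List Bool) (out : List Bool) : Prop := out = bookSeatAt_alt row col seat_status_array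
instance (row : Int) (col : Int) (seat_status_array : List Bool) (out : List Bool) : Decidable (Spec_bookSeatAt row col seat_status_array out) := by unfold Spec_bookSeatAt; infer_instance

-- ===== CLAIM (what is proved, stated in full; the proofs are below) =====
def Claim_equal_bookSeatAt : Prop := ∀ (row : Int) (col : Int) (seat_status_array : List Bool), Dom_bookSeatAt row col seat_status_array → Pre_bookSeatAt row col seat_status_array → Spec_bookSeatAt row col seat_status_array (bookSeatAt row col seat_status_array)

-- ===== LEMMAS AND PROOFS =====

lemma pyRange6 : PySem.List.pyRange 0 6 1 = [0, 1, 2, 3, 4, 5] := by decide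

lemma pyRange10 : PySem.List.pyRange 0 10 1 = [0, 1, 2, 3, 4, 5, 6, 7, 8, 9] := by decide

-- if the column never matches (col out of 0..5), the inner loop just advances pos by 6
lemma inner_miss (row col i pos : Int) (arr : List Bool)
    (h : ¬ (i = row ∧ 0 ≤ col ∧ col < 6)) :
    bookSeatAtInner row col i [0, 1, 2, 3, 4, 5] arr pos = (arr, pos + 6, false) := by
  simp only [bookSeatAtInner]
  split_ifs <;> first | (exfalso; omega) | (simp; omega)

-- if i = row and col is in 0..5, the inner loop sets position pos + col and breaks
lemma inner_hit (row col pos : Int) (arr : List Bool)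
    (hc : 0 ≤ col ∧ col < 6) :
    bookSeatAtInner row col row [0, 1, 2, 3, 4, 5] arr pos =
      (PySem.List.pySetD arr (pos + col) true, pos + col, true) := by
  obtain ⟨h0, h1⟩ := hc
  interval_cases col <;> simp [bookSeatAtInner] <;> exact ⟨by congr 1 <;> ring, by ring⟩

-- one outer iteration, for an in-range column
lemma outer_step (row col i : Int) (rest : List Int) (arr : List Bool) (pos : Int)
    (hc : 0 ≤ col ∧ col < 6) :
    bookSeatAtOuter row col (i :: rest) arr pos =
      if i = row then PySem.List.pySetD arr (pos + col) true
      else bookSeatAtOuter row col rest arr (pos + 6) := by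
  by_cases h : i = row
  · subst h
    simp only [bookSeatAtOuter, pyRange6, inner_hit i col pos arr hc]
    simp
  · simp only [bookSeatAtOuter, pyRange6, inner_miss row col i pos arr (by tauto)]
    simp [h]

-- for an out-of-range column no iteration ever matches
lemma outer_nocol (row col : Int) (is_ : List Int) (hc : ¬ (0 ≤ col ∧ col < 6)) :
    ∀ (arr : List Bool) (pos : Int), bookSeatAtOuter row col is_ arr pos = arr := by
  induction is_ with
  | nil => intro arr pos; rfl
  | cons i rest ih =>
    intro arr pos
    simp only [bookSeatAtOuter, pyRange6, inner_miss row col i pos arr (by tauto)]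
    simpa using ih arr (pos + 6)

-- ===== VERDICT =====
set_option maxHeartbeats 1600000 in
theorem bookSeatAt_spec : Claim_equal_bookSeatAt := by
  intro row col arr _ _
  unfold Spec_bookSeatAt bookSeatAt bookSeatAt_alt
  rw [pyRange10]
  by_cases hc : 0 ≤ col ∧ col < 6
  · by_cases hr : 0 ≤ row ∧ row < 10
    · rw [if_pos ⟨hr.1, hr.2, hc.1, hc.2⟩]
      simp only [outer_step _ _ _ _ _ _ hc]
      split_ifs with h0 h1 h2 h3 h4 h5 h6 h7 h8 h9 <;>
        first
          | ((first | subst h0 | subst h1 | subst h2 | subst h3 | subst h4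
                    | subst h5 | subst h6 | subst h7 | subst h8 | subst h9) <;> norm_num)
          | (exfalso; omega)
    · rw [if_neg (by tauto)]
      simp only [outer_step _ _ _ _ _ _ hc]
      split_ifs with h0 h1 h2 h3 h4 h5 h6 h7 h8 h9 <;> first | rfl | (exfalso; omega)
  · rw [outer_nocol row col _ hc, if_neg (by tauto)]
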